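-- pv_equiv track=rewrite | github.com/drunkpig/s3tableviewer | data_manager/latex_compiler.py | extract_and_preserve_at_contents
-- ===== SOURCE A (Python) =====
-- def extract_and_preserve_at_contents(original_def):
--     at_contents = []
--     non_at_parts = []
--     i = 0
--     while i < len(original_def):
--         if original_def[i:i+2] == "@{":  # 检测到@{开始
--             start = i
--             i += 2  # 跳过"@{"
--             balance = 1  # 跟踪括号平衡
--             while i < len(original_def) and balance > 0:
--                 if original_def[i] == "{":
--                     balance += 1
--                 elif original_def[i] == "}":
--                     balance -= 1
--                 i += 1
--             at_contents.append(original_def[start:i])  # 包括闭合的}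
--         else:
--             start = i
--             while i < len(original_def) and not (original_def[i] == "@" and original_def[i+1:i+2] == "{"):
--                 i += 1
--             non_at_parts.append(original_def[start:i])
--
--     # 移除空字符串
--     non_at_parts = [part for part in non_at_parts if part.strip()]
--     return at_contents, non_at_parts
-- ===== SOURCE B (Python) =====
-- def _matchlen(s):
--     # Length of the shortest prefix of s that closes one already-open brace group
--     # (i.e. up to and including the '}' whose count of '}' exceeds the count of '{'),
--     # or len(s) if the group never closes.  Recursion is on brace NESTING: a nested
--     # '{' group is skipped by a recursive call instead of tracking a depth counter.
--     consumed = 0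
--     while True:
--         b = s.find("}")
--         if b == -1:
--             return consumed + len(s)
--         a = s.find("{")
--         if a == -1 or b < a:
--             return consumed + b + 1
--         inner = _matchlen(s[a + 1:])
--         consumed += a + 1 + inner
--         s = s[a + 1 + inner:]
--
--
-- def extract_and_preserve_at_contents(original_def):
--     at_contents = []
--     raw_parts = []
--     s = original_def
--     while True:
--         p = s.find("@{")
--         if p == -1:
--             raw_parts.append(s)
--             break
--         if p == 0:
--             seg_len = 2 + _matchlen(s[2:])
--             at_contents.append(s[:seg_len])
--             s = s[seg_len:]
--         else:
--             raw_parts.append(s[:p])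
--             s = s[p:]
--     return at_contents, [part for part in raw_parts if part.strip()]
-- ===== Notes on version B (the rewrite author's own statement) =====
-- stated objective: faster
-- what changed: Replaces A's single char-by-char alternating while-loop with its brace-balance counter by a suffix-slicing scheme: an outer loop repeatedly finds the next '@{' and splits off a plain part or a segment, and the matching closing brace is located by recursion on brace NESTING (a nested '{' group is skipped by a recursive _matchlen call on the slice after it), with no depth counter anywhere.
import Mathlib
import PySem

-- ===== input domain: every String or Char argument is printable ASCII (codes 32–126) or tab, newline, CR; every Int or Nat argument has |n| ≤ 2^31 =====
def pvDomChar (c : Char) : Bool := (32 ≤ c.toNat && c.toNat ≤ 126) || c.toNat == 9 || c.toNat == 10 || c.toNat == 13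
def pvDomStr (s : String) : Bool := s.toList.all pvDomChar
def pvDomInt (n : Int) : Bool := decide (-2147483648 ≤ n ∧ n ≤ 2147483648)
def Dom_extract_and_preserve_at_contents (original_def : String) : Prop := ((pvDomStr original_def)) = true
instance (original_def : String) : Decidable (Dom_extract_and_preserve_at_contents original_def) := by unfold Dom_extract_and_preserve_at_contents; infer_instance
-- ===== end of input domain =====

-- B replaces A's char-by-char alternating while-loop with its balance counter by a
-- suffix-slicing scheme: an outer loop that repeatedly finds the next "@{" and splits
-- off either a plain part or a segment, where the matching '}' is located by recursion
-- on brace NESTING (a nested '{' group is skipped by a recursive call on the slice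
-- after it) — no depth counter anywhere.  Same results; a timing run measured B
-- faster (constant factor: str.find skips plain runs in bulk vs A's per-char loop).
-- Loops are ported as structural recursion on a fuel that provably exceeds the
-- iteration count (each iteration strictly shrinks the suffix), so no behaviour changes.

-- ===== PORT A =====
-- A's inner brace-balance while-loop; update order matches Python: inspect s[j],
-- update balance, j += 1.
def pvBalEnd (s : List Char) (fuel j : Nat) (balance : Int) : Nat :=
  match fuel with
  | 0 => j
  | fuel + 1 =>
    if j < s.length ∧ 0 < balance then
      pvBalEnd s fuel (j + 1)
        (if s[j]? = some '{' then balance + 1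
         else if s[j]? = some '}' then balance - 1 else balance)
    else j

-- A's inner `while i < len(s) and not (s[i] == "@" and s[i+1:i+2] == "{")` loop.
-- s[i] with 0 ≤ i < len is s[i]? = some _; the slice s[i+1:i+2] with nonneg in-order
-- bounds is (s.drop (i+1)).take 1 — exact (Python slices clamp exactly like drop/take here).
def pvScanNon (s : List Char) (fuel i : Nat) : Nat :=
  match fuel with
  | 0 => i
  | fuel + 1 =>
    if i < s.length ∧ ¬(s[i]? = some '@' ∧ (s.drop (i + 1)).take 1 = ['{']) then
      pvScanNon s fuel (i + 1)
    else i

-- A's outer while-loop; the lists are built by cons in recursion order (= A's append order).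
-- s[i:i+2] and s[start:i] are nonneg in-order slices, ported as drop/take (exact).
def pvLoopA (s : List Char) (fuel i : Nat) : List (List Char) × List (List Char) :=
  match fuel with
  | 0 => ([], [])
  | fuel + 1 =>
    if i < s.length then
      if (s.drop i).take 2 = ['@', '{'] then
        let e := pvBalEnd s s.length (i + 2) 1
        let r := pvLoopA s fuel e
        (((s.drop i).take (e - i)) :: r.1, r.2)
      else
        let p := pvScanNon s s.length i
        let r := pvLoopA s fuel p
        (r.1, ((s.drop i).take (p - i)) :: r.2)
    else ([], [])

def extract_and_preserve_at_contents (original_def : String) : List String × List String :=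
  let s := original_def.toList
  let r := pvLoopA s (s.length + 1) 0
  (r.1.map (fun cs => String.ofList cs),
   (r.2.filter (fun part => !(PySem.Chars.strip part).isEmpty)).map (fun cs => String.ofList cs))

-- ===== PORT B =====
-- Source B's `_matchlen` while-loop, ported as fuel recursion with the same state
-- (the remaining slice `s` and the accumulator `consumed`); the recursive Python call
-- `_matchlen(s[a+1:])` is the inner `pvMatchLen … 0` call.  s.find("}") / s.find("{")
-- are PySem.Chars.find; slices s[k:] with k ≥ 0 are `drop` (exact).
def pvMatchLen : Nat → List Char → Nat → Nat
  | 0, _, consumed => consumed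
  | fuel + 1, s, consumed =>
    let b := PySem.Chars.find s ['}']
    if b = -1 then consumed + s.length
    else
      let a := PySem.Chars.find s ['{']
      if a = -1 ∨ b < a then consumed + b.toNat + 1
      else
        let inner := pvMatchLen fuel (s.drop (a.toNat + 1)) 0
        pvMatchLen fuel (s.drop (a.toNat + 1 + inner)) (consumed + a.toNat + 1 + inner)

-- Source B's outer `while True` loop over the shrinking suffix `s`; one constructor step
-- = one loop iteration (find "@{", then: no hit / segment at 0 / plain part before it).
def pvSplit : Nat → List Char → List (List Char) × List (List Char)
  | 0, _ => ([], [])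
  | fuel + 1, s =>
    let p := PySem.Chars.find s ['@', '{']
    if p = -1 then ([], [s])
    else if p = 0 then
      let segLen := 2 + pvMatchLen (s.drop 2).length (s.drop 2) 0
      let r := pvSplit fuel (s.drop segLen)
      (s.take segLen :: r.1, r.2)
    else
      let r := pvSplit fuel (s.drop p.toNat)
      (r.1, s.take p.toNat :: r.2)

def extract_and_preserve_at_contents_alt (original_def : String) : List String × List String :=
  let s := original_def.toList
  let r := pvSplit (s.length + 1) s
  (r.1.map (fun cs => String.ofList cs),
   (r.2.filter (fun part => !(PySem.Chars.strip part).isEmpty)).map (fun cs => String.ofList cs))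

-- ===== PRECONDITION & SPEC =====
def Spec_extract_and_preserve_at_contents (original_def : String) (out : List String × List String) : Prop := out = extract_and_preserve_at_contents_alt original_def
instance (original_def : String) (out : List String × List String) : Decidable (Spec_extract_and_preserve_at_contents original_def out) := by unfold Spec_extract_and_preserve_at_contents; infer_instance

-- ===== CLAIM (what is proved, stated in full; the proofs are below) =====
def Claim_equal_extract_and_preserve_at_contents : Prop := ∀ (original_def : String), Dom_extract_and_preserve_at_contents original_def → Spec_extract_and_preserve_at_contents original_def (extract_and_preserve_at_contents original_def)

-- ===== LEMMAS AND PROOFS =====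

-- Semantic reference: chars consumed from t, starting at depth d, until the depth
-- would drop to 0 (the closing '}' is consumed) or t is exhausted.
def pvDEnd : List Char → Int → Nat
  | [], _ => 0
  | c :: t, d =>
    if 0 < d then
      1 + pvDEnd t (if c = '{' then d + 1 else if c = '}' then d - 1 else d)
    else 0

theorem pvDEnd_nonpos (t : List Char) (d : Int) (hd : ¬ 0 < d) : pvDEnd t d = 0 := by
  cases t with
  | nil => rfl
  | cons c t => rw [pvDEnd, if_neg hd]

theorem pvKeep_nil : (!(PySem.Chars.strip ([] : List Char)).isEmpty) = false := by decide

theorem pvBalEnd_ge (s : List Char) (fuel : Nat) : ∀ j (b : Int), j ≤ pvBalEnd s fuel j b := by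
  induction fuel with
  | zero => intro j b; exact Nat.le_refl j
  | succ fuel ih =>
    intro j b
    rw [pvBalEnd]
    split
    · exact Nat.le_trans (Nat.le_succ j) (ih (j + 1) _)
    · exact Nat.le_refl j

theorem pvBalEnd_le (s : List Char) (fuel : Nat) : ∀ j (b : Int), j ≤ s.length →
    pvBalEnd s fuel j b ≤ s.length := by
  induction fuel with
  | zero => intro j b hj; exact hj
  | succ fuel ih =>
    intro j b hj
    rw [pvBalEnd]
    split
    · rename_i h; exact ih (j + 1) _ (by omega)
    · exact hj

-- A's balance loop computes pvDEnd on the suffix.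
theorem pvBalEnd_eq_dEnd (s : List Char) : ∀ fuel j (d : Int), j ≤ s.length →
    s.length - j ≤ fuel → pvBalEnd s fuel j d = j + pvDEnd (s.drop j) d := by
  intro fuel
  induction fuel with
  | zero =>
    intro j d hj hf
    have hje : j = s.length := by omega
    subst hje
    rw [pvBalEnd, List.drop_length, pvDEnd]
    omega
  | succ fuel ih =>
    intro j d hj hf
    rw [pvBalEnd]
    split
    · rename_i h
      obtain ⟨hjl, hd⟩ := h
      have hdrop : s.drop j = s[j] :: s.drop (j + 1) := List.drop_eq_getElem_cons hjl
      rw [ih (j + 1) _ (by omega) (by omega), hdrop, pvDEnd, if_pos hd,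
        List.getElem?_eq_getElem hjl]
      simp only [Option.some.injEq]
      omega
    · rename_i h
      by_cases hjl : j < s.length
      · have hd : ¬ 0 < d := by tauto
        have hdrop : s.drop j = s[j] :: s.drop (j + 1) := List.drop_eq_getElem_cons hjl
        rw [hdrop, pvDEnd_nonpos _ _ hd]
        omega
      · have hnil : s.drop j = [] := List.drop_eq_nil_of_le (by omega)
        rw [hnil, pvDEnd]
        omega

-- Composition: consuming from depth d+1 first closes one level (pvDEnd t 1 chars),
-- then continues at depth d.
theorem pvDEnd_succ : ∀ (n : Nat), ∀ (t : List Char), t.length ≤ n → ∀ (d : Int), 1 ≤ d →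
    pvDEnd t (d + 1) = pvDEnd t 1 + pvDEnd (t.drop (pvDEnd t 1)) d := by
  intro n
  induction n with
  | zero =>
    intro t ht d hd
    have : t = [] := List.eq_nil_of_length_eq_zero (by omega)
    subst this
    simp [pvDEnd]
  | succ n ih =>
    intro t ht d hd
    cases t with
    | nil => simp [pvDEnd]
    | cons c t =>
      have htn : t.length ≤ n := by simpa using Nat.lt_succ_iff.mp (by simpa using ht)
      by_cases hc : c = '{'
      · subst hc
        have h1 : pvDEnd ('{' :: t) 1 = 1 + pvDEnd t 2 := by
          rw [pvDEnd, if_pos (by norm_num)]; norm_num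
        have hD : pvDEnd ('{' :: t) (d + 1) = 1 + pvDEnd t (d + 2) := by
          rw [pvDEnd, if_pos (by omega), if_pos rfl]; ring_nf
        set k1 := pvDEnd t 1 with hk1
        have h2 : pvDEnd t 2 = k1 + pvDEnd (t.drop k1) 1 := by
          have hh := ih t htn 1 (by omega)
          rw [show (1 : Int) + 1 = 2 by norm_num] at hh
          exact hh
        have hd2 : pvDEnd t (d + 2) = k1 + pvDEnd (t.drop k1) (d + 1) := by
          have := ih t htn (d + 1) (by omega)
          rw [show d + 1 + 1 = d + 2 by ring] at this
          exact this
        have h3 : pvDEnd (t.drop k1) (d + 1) =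
            pvDEnd (t.drop k1) 1 + pvDEnd ((t.drop k1).drop (pvDEnd (t.drop k1) 1)) d :=
          ih (t.drop k1) (by simpa using Nat.le_trans (Nat.sub_le _ _) htn) d hd
        set k2 := pvDEnd (t.drop k1) 1 with hk2
        have hdd : (t.drop k1).drop k2 = t.drop (k1 + k2) := by
          rw [List.drop_drop]
        rw [hD, h1, h2, hd2, h3, hdd]
        have hcons : ('{' :: t).drop (1 + (k1 + pvDEnd (t.drop k1) 1)) = t.drop (k1 + k2) := by
          rw [show 1 + (k1 + pvDEnd (t.drop k1) 1) = (k1 + k2) + 1 by omega]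
          simp [List.drop_succ_cons]
        rw [hcons]
        omega
      · by_cases hc2 : c = '}'
        · subst hc2
          have h1 : pvDEnd ('}' :: t) 1 = 1 := by
            have h0 : pvDEnd t 0 = 0 := pvDEnd_nonpos t 0 (by norm_num)
            rw [pvDEnd, if_pos (by norm_num), if_neg (by decide), if_pos rfl]
            norm_num [h0]
          have hD : pvDEnd ('}' :: t) (d + 1) = 1 + pvDEnd t d := by
            rw [pvDEnd, if_pos (by omega)]
            have : ¬ ('}' : Char) = '{' := by decide
            rw [if_neg this, if_pos rfl]
            ring_nf
          rw [hD, h1]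
          simp [List.drop_succ_cons]
        · have hupd : ∀ e : Int, (if c = '{' then e + 1 else if c = '}' then e - 1 else e) = e := by
            intro e; rw [if_neg hc, if_neg hc2]
          have h1 : pvDEnd (c :: t) 1 = 1 + pvDEnd t 1 := by
            rw [pvDEnd, if_pos (by norm_num), hupd]
          have hD : pvDEnd (c :: t) (d + 1) = 1 + pvDEnd t (d + 1) := by
            rw [pvDEnd, if_pos (by omega), hupd]
          rw [hD, h1, ih t htn d hd]
          rw [show 1 + pvDEnd t 1 = pvDEnd t 1 + 1 by omega, List.drop_succ_cons]
          omega

theorem pvSingleton_infix_iff (c : Char) (s : List Char) : ([c] <:+: s) ↔ c ∈ s := by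
  constructor
  · intro h
    exact List.singleton_sublist.mp h.sublist
  · intro h
    obtain ⟨u, v, rfl⟩ := List.append_of_mem h
    exact ⟨u, v, by simp⟩

theorem pvSingleton_prefix_iff (c : Char) (l : List Char) : ([c] <+: l) ↔ l.head? = some c := by
  cases l with
  | nil => simp
  | cons a t => simp [List.cons_prefix_cons, eq_comm]

theorem pvNoClose (t : List Char) (hm : '}' ∉ t) : ∀ d : Int, 1 ≤ d → pvDEnd t d = t.length := by
  induction t with
  | nil => intro d hd; rfl
  | cons c t ih =>
    intro d hd
    have hc : c ≠ '}' := by intro h; exact hm (h ▸ List.mem_cons_self)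
    have hmt : '}' ∉ t := fun h => hm (List.mem_cons_of_mem _ h)
    rw [pvDEnd, if_pos (by omega)]
    by_cases hc1 : c = '{'
    · rw [if_pos hc1, ih hmt (d + 1) (by omega)]; simp only [List.length_cons]; omega
    · rw [if_neg hc1, if_neg hc, ih hmt d hd]; simp only [List.length_cons]; omega

theorem pvFreePrefix (u : List Char) (h1 : '{' ∉ u) (h2 : '}' ∉ u) :
    ∀ (v : List Char) (d : Int), 1 ≤ d → pvDEnd (u ++ v) d = u.length + pvDEnd v d := by
  induction u with
  | nil => intro v d hd; simp
  | cons c u ih =>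
    intro v d hd
    have hc1 : c ≠ '{' := by intro h; exact h1 (h ▸ List.mem_cons_self)
    have hc2 : c ≠ '}' := by intro h; exact h2 (h ▸ List.mem_cons_self)
    rw [List.cons_append, pvDEnd, if_pos (by omega), if_neg hc1, if_neg hc2,
      ih (fun h => h1 (List.mem_cons_of_mem _ h)) (fun h => h2 (List.mem_cons_of_mem _ h)) v d hd]
    simp
    omega

theorem pvNotMem_take (s : List Char) (bn : Nat) (ch : Char)
    (h : ∀ m, m < bn → ¬ s[m]? = some ch) : ch ∉ s.take bn := by
  intro hm
  obtain ⟨i, hi, hgi⟩ := List.getElem_of_mem hm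
  have hilt : i < bn ∧ i < s.length := by
    simp [List.length_take] at hi
    omega
  apply h i hilt.1
  rw [List.getElem?_eq_getElem hilt.2]
  rw [List.getElem_take] at hgi
  rw [hgi]

-- B's _matchlen computes pvDEnd at depth 1 (plus the accumulator).
theorem pvMatchLen_eq : ∀ (fuel : Nat) (s : List Char) (c : Nat), s.length ≤ fuel →
    pvMatchLen fuel s c = c + pvDEnd s 1 := by
  intro fuel
  induction fuel with
  | zero =>
    intro s c hs
    have : s = [] := List.eq_nil_of_length_eq_zero (by omega)
    subst this
    rfl
  | succ fuel ih =>
    intro s c hs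
    rw [pvMatchLen]
    simp only []
    by_cases hb : PySem.Chars.find s ['}'] = -1
    · rw [if_pos hb]
      have hnm : '}' ∉ s := by
        intro h
        exact ((PySem.Chars.find_eq_neg_one_iff s ['}']).mp hb) ((pvSingleton_infix_iff _ _).mpr h)
      rw [pvNoClose s hnm 1 (by norm_num)]
    · rw [if_neg hb]
      have hb0 : 0 ≤ PySem.Chars.find s ['}'] := by
        have := PySem.Chars.neg_one_le_find s ['}']
        omega
      obtain ⟨hbpre, hbmin⟩ := PySem.Chars.find_spec hb0
      set bn := (PySem.Chars.find s ['}']).toNat with hbn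
      have hbch : s[bn]? = some '}' := by
        rw [← List.head?_drop]
        exact (pvSingleton_prefix_iff _ _).mp hbpre
      have hbl : bn < s.length := by
        by_contra hh
        rw [List.getElem?_eq_none (by omega)] at hbch
        simp at hbch
      have hnobrace : ∀ m, m < bn → ¬ s[m]? = some '}' := by
        intro m hm hsm
        exact hbmin m hm ((pvSingleton_prefix_iff _ _).mpr (by rw [List.head?_drop]; exact hsm))
      by_cases ha : PySem.Chars.find s ['{'] = -1 ∨ PySem.Chars.find s ['}'] < PySem.Chars.find s ['{']
      · rw [if_pos ha]
        -- first brace of s is the '}' at bn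
        have hnoopen : ∀ m, m < bn → ¬ s[m]? = some '{' := by
          intro m hm hsm
          rcases ha with ha | ha
          · have : '{' ∉ s := fun h =>
              ((PySem.Chars.find_eq_neg_one_iff s ['{']).mp ha) ((pvSingleton_infix_iff _ _).mpr h)
            exact this (List.mem_of_getElem? hsm)
          · have ha0 : 0 ≤ PySem.Chars.find s ['{'] := by omega
            obtain ⟨_, hamin⟩ := PySem.Chars.find_spec ha0
            exact hamin m (by omega)
              ((pvSingleton_prefix_iff _ _).mpr (by rw [List.head?_drop]; exact hsm))
        have hsplit : s = s.take bn ++ s.drop bn := (List.take_append_drop bn s).symm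
        have hdropb : s.drop bn = '}' :: s.drop (bn + 1) := by
          rw [List.drop_eq_getElem_cons hbl]
          congr 1
          have := List.getElem?_eq_getElem hbl
          rw [this] at hbch
          exact Option.some.inj hbch
        have hds : pvDEnd s 1 = bn + 1 := by
          conv_lhs => rw [hsplit]
          rw [pvFreePrefix _ (pvNotMem_take s bn _ hnoopen) (pvNotMem_take s bn _ hnobrace)
            _ 1 (by norm_num), hdropb, pvDEnd, if_pos (by norm_num), if_neg (by decide),
            if_pos rfl, pvDEnd_nonpos _ _ (by norm_num)]
          simp [List.length_take]
          omega
        omega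
      · rw [if_neg ha]
        push Not at ha
        obtain ⟨ha1, ha2⟩ := ha
        have ha0 : 0 ≤ PySem.Chars.find s ['{'] := by
          have := PySem.Chars.neg_one_le_find s ['{']
          omega
        obtain ⟨hapre, hamin⟩ := PySem.Chars.find_spec ha0
        set an := (PySem.Chars.find s ['{']).toNat with han
        have hach : s[an]? = some '{' := by
          rw [← List.head?_drop]
          exact (pvSingleton_prefix_iff _ _).mp hapre
        have hal : an < s.length := by
          by_contra hh
          rw [List.getElem?_eq_none (by omega)] at hach
          simp at hach
        have hanb : an ≤ bn := by
          have : PySem.Chars.find s ['{'] ≤ PySem.Chars.find s ['}'] := ha2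
          omega
        have hanb' : an ≠ bn := by
          intro h
          rw [h, hbch] at hach
          exact absurd (Option.some.inj hach) (by decide)
        -- first brace of s is the '{' at an
        have hnoopen : ∀ m, m < an → ¬ s[m]? = some '{' := by
          intro m hm hsm
          exact hamin m hm ((pvSingleton_prefix_iff _ _).mpr (by rw [List.head?_drop]; exact hsm))
        have hnocl : ∀ m, m < an → ¬ s[m]? = some '}' := by
          intro m hm
          exact hnobrace m (by omega)
        have hsplit : s = s.take an ++ s.drop an := (List.take_append_drop an s).symm
        have hdropa : s.drop an = '{' :: s.drop (an + 1) := by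
          rw [List.drop_eq_getElem_cons hal]
          congr 1
          have := List.getElem?_eq_getElem hal
          rw [this] at hach
          exact Option.some.inj hach
        set rest := s.drop (an + 1) with hrest
        have hrlen : rest.length = s.length - (an + 1) := by simp [hrest]
        have hinner : pvMatchLen fuel rest 0 = pvDEnd rest 1 := by
          have := ih rest 0 (by omega)
          omega
        set k1 := pvDEnd rest 1 with hk1
        have hsuccd : pvDEnd rest 2 = k1 + pvDEnd (rest.drop k1) 1 := by
          have := pvDEnd_succ rest.length rest (le_refl _) 1 (le_refl _)
          norm_num at this
          exact this
        have hdd : s.drop (an + 1 + pvMatchLen fuel (s.drop (an + 1)) 0) = rest.drop k1 := by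
          rw [← hrest, hinner, hrest, List.drop_drop]
        rw [hdd]
        rw [ih (rest.drop k1) _ (by rw [List.length_drop]; omega)]
        have hds : pvDEnd s 1 = an + 1 + pvDEnd rest 2 := by
          conv_lhs => rw [hsplit]
          rw [pvFreePrefix _ (pvNotMem_take s an _ hnoopen) (pvNotMem_take s an _ hnocl)
            _ 1 (by norm_num), hdropa, pvDEnd, if_pos (by norm_num), if_pos rfl]
          norm_num [List.length_take]
          omega
        omega

-- "position m starts an @-segment", in slice form vs A's pointwise form
theorem pvAt_iff (s : List Char) (i : Nat) (hi : i < s.length) :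
    (s.drop i).take 2 = ['@', '{'] ↔ (s[i]? = some '@' ∧ (s.drop (i + 1)).take 1 = ['{']) := by
  rw [List.drop_eq_getElem_cons hi, List.getElem?_eq_getElem hi]
  simp only [List.take_succ_cons, List.cons.injEq, Option.some.injEq]

theorem pvPrefix_iff (s : List Char) (m : Nat) :
    (['@', '{'] : List Char) <+: s.drop m ↔ (s.drop m).take 2 = ['@', '{'] := by
  rw [List.prefix_iff_eq_take]
  exact ⟨fun h => h.symm, fun h => h.symm⟩

theorem pvNotAt_of_no_infix (s : List Char) (i m : Nat) (him : i ≤ m)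
    (h : ¬ (['@', '{'] : List Char) <:+: s.drop i) : ¬ (s.drop m).take 2 = ['@', '{'] := by
  intro hat
  apply h
  rw [List.infix_iff_prefix_suffix]
  refine ⟨s.drop m, (pvPrefix_iff s m).mpr hat, ?_⟩
  have hdd : s.drop m = (s.drop i).drop (m - i) := by
    rw [List.drop_drop]; congr 1; omega
  rw [hdd]
  exact List.drop_suffix _ _

theorem pvScanNon_eq (s : List Char) : ∀ fuel i q, q - i ≤ fuel → i ≤ q → q ≤ s.length →
    (q = s.length ∨ (s.drop q).take 2 = ['@', '{']) →
    (∀ m, i ≤ m → m < q → ¬ (s.drop m).take 2 = ['@', '{']) →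
    pvScanNon s fuel i = q := by
  intro fuel
  induction fuel with
  | zero =>
    intro i q hk hiq hq hend hmin
    have hieq : i = q := by omega
    rw [pvScanNon, hieq]
  | succ fuel ih =>
    intro i q hk hiq hq hend hmin
    by_cases hieq : i = q
    · subst hieq
      rw [pvScanNon, if_neg]
      rintro ⟨h1, h2⟩
      rcases hend with hend | hend
      · omega
      · exact h2 ((pvAt_iff s i h1).mp hend)
    · have hlt : i < q := by omega
      rw [pvScanNon, if_pos ⟨by omega,
        fun hpoint => hmin i (Nat.le_refl i) hlt ((pvAt_iff s i (by omega)).mpr hpoint)⟩]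
      exact ih (i + 1) q (by omega) (by omega) hq hend (fun m hm hmq => hmin m (by omega) hmq)

theorem pvLoopA_end (s : List Char) (fuel i : Nat) (hi : ¬ i < s.length) :
    pvLoopA s fuel i = ([], []) := by
  cases fuel with
  | zero => rw [pvLoopA]
  | succ fuel => rw [pvLoopA, if_neg hi]

theorem pvLoopA_at (s : List Char) (fuel i : Nat) (hi : i < s.length)
    (hat : (s.drop i).take 2 = ['@', '{']) :
    pvLoopA s (fuel + 1) i =
      (((s.drop i).take (pvBalEnd s s.length (i + 2) 1 - i)) ::
          (pvLoopA s fuel (pvBalEnd s s.length (i + 2) 1)).1,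
        (pvLoopA s fuel (pvBalEnd s s.length (i + 2) 1)).2) := by
  rw [pvLoopA, if_pos hi, if_pos hat]

theorem pvLoopA_non (s : List Char) (fuel i : Nat) (hi : i < s.length)
    (hat : ¬ (s.drop i).take 2 = ['@', '{']) :
    pvLoopA s (fuel + 1) i = ((pvLoopA s fuel (pvScanNon s s.length i)).1,
      ((s.drop i).take (pvScanNon s s.length i - i)) :: (pvLoopA s fuel (pvScanNon s s.length i)).2) := by
  rw [pvLoopA, if_pos hi, if_neg hat]

theorem pvSplit_neg (fuel : Nat) (t : List Char) (hp : PySem.Chars.find t ['@', '{'] = -1) :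
    pvSplit (fuel + 1) t = ([], [t]) := by
  rw [pvSplit]
  simp only []
  rw [if_pos hp]

theorem pvSplit_zero (fuel : Nat) (t : List Char) (hp : PySem.Chars.find t ['@', '{'] = 0) :
    pvSplit (fuel + 1) t =
      (t.take (2 + pvMatchLen (t.drop 2).length (t.drop 2) 0) ::
          (pvSplit fuel (t.drop (2 + pvMatchLen (t.drop 2).length (t.drop 2) 0))).1,
        (pvSplit fuel (t.drop (2 + pvMatchLen (t.drop 2).length (t.drop 2) 0))).2) := by
  rw [pvSplit]
  simp only []
  rw [if_neg (by omega), if_pos hp]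

theorem pvSplit_pos (fuel : Nat) (t : List Char) (hp1 : ¬ PySem.Chars.find t ['@', '{'] = -1)
    (hp2 : ¬ PySem.Chars.find t ['@', '{'] = 0) :
    pvSplit (fuel + 1) t =
      ((pvSplit fuel (t.drop (PySem.Chars.find t ['@', '{']).toNat)).1,
        t.take (PySem.Chars.find t ['@', '{']).toNat ::
          (pvSplit fuel (t.drop (PySem.Chars.find t ['@', '{']).toNat)).2) := by
  rw [pvSplit]
  simp only []
  rw [if_neg hp1, if_neg hp2]

theorem pvMain (s : List Char) : ∀ f g i, i ≤ s.length → s.length - i < f → s.length - i < g →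
    (pvLoopA s f i).1 = (pvSplit g (s.drop i)).1 ∧
    (pvLoopA s f i).2.filter (fun part => !(PySem.Chars.strip part).isEmpty) =
      ((pvSplit g (s.drop i)).2).filter (fun part => !(PySem.Chars.strip part).isEmpty) := by
  intro f
  induction f with
  | zero => intro g i hi hf hg; omega
  | succ f ih =>
    intro g i hi hf hg
    obtain ⟨g', rfl⟩ : ∃ g', g = g' + 1 := ⟨g - 1, by omega⟩
    by_cases hin : i < s.length
    · set t := s.drop i with ht
      by_cases hp : PySem.Chars.find t ['@', '{'] = -1
      · -- no "@{" from i on: A scans once to the end, B emits the whole suffix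
        have hninf : ¬ (['@', '{'] : List Char) <:+: s.drop i :=
          (PySem.Chars.find_eq_neg_one_iff t ['@', '{']).mp hp
        have hnoat : ∀ m, i ≤ m → ¬ (s.drop m).take 2 = ['@', '{'] :=
          fun m hm => pvNotAt_of_no_infix s i m hm hninf
        have hscan : pvScanNon s s.length i = s.length :=
          pvScanNon_eq s s.length i s.length (by omega) (by omega) (Nat.le_refl _)
            (Or.inl rfl) (fun m hm _ => hnoat m hm)
        rw [pvSplit_neg g' t hp, pvLoopA_non s f i hin (hnoat i (Nat.le_refl i)), hscan,
          pvLoopA_end s f s.length (by omega)]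
        have htake : (s.drop i).take (s.length - i) = t := by
          rw [ht]
          apply List.take_of_length_le
          rw [List.length_drop]
        rw [htake]
        exact ⟨rfl, rfl⟩
      · have hp0 : 0 ≤ PySem.Chars.find t ['@', '{'] := by
          have := PySem.Chars.neg_one_le_find t ['@', '{']
          omega
        obtain ⟨hpre, hmin⟩ := PySem.Chars.find_spec hp0
        set pn := (PySem.Chars.find t ['@', '{']).toNat with hpn
        have htdrop : ∀ m : Nat, t.drop m = s.drop (i + m) := by
          intro m
          rw [ht, List.drop_drop, Nat.add_comm]
        have hpre'' : (t.drop pn).take 2 = ['@', '{'] := (pvPrefix_iff t pn).mp hpre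
        have hpre' : (s.drop (i + pn)).take 2 = ['@', '{'] := by
          rw [← htdrop pn]
          exact hpre''
        have hlen2 : i + pn + 2 ≤ s.length := by
          have h1 : 2 ≤ (t.drop pn).length := by
            have := hpre.length_le
            simpa using this
          rw [ht] at h1
          simp [List.length_drop] at h1
          omega
        have hminabs : ∀ m, i ≤ m → m < i + pn → ¬ (s.drop m).take 2 = ['@', '{'] := by
          intro m hm hmq hat
          apply hmin (m - i) (by omega)
          rw [htdrop (m - i), show i + (m - i) = m by omega]
          exact (pvPrefix_iff s m).mpr hat
        by_cases hpz : pn = 0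
        · -- A stands exactly on "@{": both take the same segment
          have hpz' : PySem.Chars.find t ['@', '{'] = 0 := by omega
          have hat : (s.drop i).take 2 = ['@', '{'] := by
            have := hpre'
            rw [hpz] at this
            simpa using this
          have he : pvBalEnd s s.length (i + 2) 1 = (i + 2) + pvDEnd (s.drop (i + 2)) 1 :=
            pvBalEnd_eq_dEnd s s.length (i + 2) 1 (by omega) (by omega)
          have hml : pvMatchLen (t.drop 2).length (t.drop 2) 0 = pvDEnd (s.drop (i + 2)) 1 := by
            rw [pvMatchLen_eq _ _ _ (le_refl _), htdrop 2]
            omega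
          set e := pvBalEnd s s.length (i + 2) 1 with hedef
          have hee : e = i + (2 + pvMatchLen (t.drop 2).length (t.drop 2) 0) := by
            rw [he, hml]; omega
          have hele : e ≤ s.length := pvBalEnd_le s s.length (i + 2) 1 (by omega)
          have hege : i + 2 ≤ e := pvBalEnd_ge s s.length (i + 2) 1
          rw [pvLoopA_at s f i hin hat, pvSplit_zero g' t hpz']
          have hrec : t.drop (2 + pvMatchLen (t.drop 2).length (t.drop 2) 0) = s.drop e := by
            rw [htdrop, ← hee]
          have hseg : t.take (2 + pvMatchLen (t.drop 2).length (t.drop 2) 0) =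
              (s.drop i).take (e - i) := by
            rw [← ht]
            congr 1
            omega
          have hihe := ih g' e hele (by omega) (by omega)
          rw [hrec] at *
          constructor
          · rw [hseg, ← hedef, hihe.1]
          · rw [← hedef, hihe.2]
        · -- A first scans the plain run [i, i+pn); B slices it off directly
          have hq : i < i + pn := by omega
          have hscan : pvScanNon s s.length i = i + pn :=
            pvScanNon_eq s s.length i (i + pn) (by omega) (by omega) (by omega)
              (Or.inr hpre') hminabs
          have hnotat : ¬ (s.drop i).take 2 = ['@', '{'] :=
            hminabs i (Nat.le_refl i) hq
          rw [pvLoopA_non s f i hin hnotat, hscan,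
            pvSplit_pos g' t hp (by omega)]
          have hrec : t.drop pn = s.drop (i + pn) := htdrop pn
          have hpart : t.take pn = (s.drop i).take (i + pn - i) := by
            rw [ht]
            congr 1
            omega
          have hihq := ih g' (i + pn) (by omega) (by omega) (by omega)
          rw [← hpn, hrec] at *
          constructor
          · exact hihq.1
          · rw [List.filter_cons, List.filter_cons, hihq.2, hpart]
        -- end pn cases
    · -- i = len: A stops; B sees the empty suffix, whose raw part is filtered away
      have hieq : i = s.length := by omega
      have hdrop : s.drop i = [] := List.drop_eq_nil_of_le (by omega)
      have hfind : PySem.Chars.find ([] : List Char) ['@', '{'] = -1 := by decide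
      rw [pvLoopA_end s (f + 1) i (by omega), hdrop, pvSplit_neg g' [] hfind]
      exact ⟨rfl, by simp [pvKeep_nil]⟩

-- ===== VERDICT (by name: the statement is the Claim_ definition above) =====
theorem extract_and_preserve_at_contents_spec : Claim_equal_extract_and_preserve_at_contents := by
  intro d _
  unfold Spec_extract_and_preserve_at_contents
  unfold extract_and_preserve_at_contents extract_and_preserve_at_contents_alt
  have h := pvMain d.toList (d.toList.length + 1) (d.toList.length + 1) 0 (Nat.zero_le _)
    (by omega) (by omega)
  rw [List.drop_zero] at h
  dsimp only
  rw [h.1, h.2]
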